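-- pv_equiv track=rewrite | github.com/HeJiabei616/ML_Project | Part3.py | refined_trans_dict
-- ===== SOURCE A (Python) =====
-- import copy
--
-- def refined_trans_dict(tr_d,klabels):
--     r_trans_dict={}
--     mylabels = copy.deepcopy(klabels)
--     mylabels.insert(0,'START')
--     mylabels.insert(len(mylabels),'STOP')
--     for o_label in mylabels:
--         r_trans_dict[o_label]={}
--         for i_label in mylabels:
--             key = (o_label,i_label)
--             if key in tr_d.keys():
--                 r_trans_dict[o_label][i_label]=tr_d[key]
--             else:
--                 r_trans_dict[o_label][i_label]=0
--     return r_trans_dict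
-- ===== SOURCE B (Python) =====
-- def refined_trans_dict(tr_d, klabels):
--     mylabels = ['START'] + list(klabels) + ['STOP']
--     label_set = set(mylabels)
--     r_trans_dict = {o: {i: 0 for i in mylabels} for o in mylabels}
--     for (o, i), v in tr_d.items():
--         if o in label_set and i in label_set:
--             r_trans_dict[o][i] = v
--     return r_trans_dict
-- ===== Notes on version B (the rewrite author's own statement) =====
-- stated objective: alternative
-- what changed: Replaces A's nested label-pair loops that probe the sparse dict per cell with building the dense all-zeros table first and then overlaying it in a single pass over tr_d's items, guarded by a label set.
import Mathlib
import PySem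

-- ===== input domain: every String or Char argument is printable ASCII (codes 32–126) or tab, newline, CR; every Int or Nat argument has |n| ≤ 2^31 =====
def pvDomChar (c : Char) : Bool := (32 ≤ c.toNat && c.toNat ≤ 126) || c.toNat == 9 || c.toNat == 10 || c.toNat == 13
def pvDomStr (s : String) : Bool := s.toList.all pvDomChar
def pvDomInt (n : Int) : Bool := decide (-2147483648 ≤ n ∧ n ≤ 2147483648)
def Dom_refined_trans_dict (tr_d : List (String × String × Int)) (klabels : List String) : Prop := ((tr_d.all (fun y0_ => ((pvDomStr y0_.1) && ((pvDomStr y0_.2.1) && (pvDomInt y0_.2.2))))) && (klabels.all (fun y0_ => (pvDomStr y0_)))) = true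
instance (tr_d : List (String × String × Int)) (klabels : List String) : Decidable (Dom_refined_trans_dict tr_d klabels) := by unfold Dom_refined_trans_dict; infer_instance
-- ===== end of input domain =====

-- B replaces A's nested label-pair loops probing tr_d per cell with a dense zero table overlaid in one pass over tr_d's items (alternative decomposition, same cost class).

-- ===== PORT A =====
-- tr_d is a Python dict keyed by (o, i) pairs; its association list is reassembled into a PySem.Dict.
def refined_trans_dict (tr_d : List (String × String × Int)) (klabels : List String) : List (String × List (String × Int)) :=
  let d : PySem.Dict (String × String) Int := PySem.Dict.ofList (tr_d.map (fun p => ((p.1, p.2.1), p.2.2)))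
  let mylabels : List String := ["START"] ++ klabels ++ ["STOP"]
  let r : PySem.Dict String (PySem.Dict String Int) :=
    mylabels.foldl (fun r o =>
      let inner : PySem.Dict String Int :=
        mylabels.foldl (fun inn i =>
          if d.contains (o, i) then inn.insert i (d.getD (o, i) 0) else inn.insert i 0)
          PySem.Dict.empty
      r.insert o inner) PySem.Dict.empty
  r.items.map (fun p => (p.1, p.2.items))

-- ===== PORT B =====
def refined_trans_dict_alt (tr_d : List (String × String × Int)) (klabels : List String) : List (String × List (String × Int)) :=
  let mylabels : List String := ["START"] ++ klabels ++ ["STOP"]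
  let labelSet : PySem.Set String := PySem.Set.ofList mylabels
  let base : PySem.Dict String (PySem.Dict String Int) :=
    mylabels.foldl (fun r o =>
      r.insert o (mylabels.foldl (fun inn i => inn.insert i (0 : Int)) PySem.Dict.empty))
      PySem.Dict.empty
  let d : PySem.Dict (String × String) Int := PySem.Dict.ofList (tr_d.map (fun p => ((p.1, p.2.1), p.2.2)))
  let r : PySem.Dict String (PySem.Dict String Int) :=
    d.items.foldl (fun r p =>
      if labelSet.contains p.1.1 && labelSet.contains p.1.2 then
        r.modify p.1.1 PySem.Dict.empty (fun inn => inn.insert p.1.2 p.2)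
      else r) base
  r.items.map (fun p => (p.1, p.2.items))

-- ===== PRECONDITION & SPEC =====
def Spec_refined_trans_dict (tr_d : List (String × String × Int)) (klabels : List String) (out : List (String × List (String × Int))) : Prop := out = refined_trans_dict_alt tr_d klabels
instance (tr_d : List (String × String × Int)) (klabels : List String) (out : List (String × List (String × Int))) : Decidable (Spec_refined_trans_dict tr_d klabels out) := by unfold Spec_refined_trans_dict; infer_instance

-- ===== CLAIM (what is proved, stated in full; the proofs are below) =====
def Claim_equal_refined_trans_dict : Prop := ∀ (tr_d : List (String × String × Int)) (klabels : List String), Dom_refined_trans_dict tr_d klabels → Spec_refined_trans_dict tr_d klabels (refined_trans_dict tr_d klabels)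

-- ===== LEMMAS AND PROOFS =====

-- folding inserts of a key-determined value: the result at key y is f y if y was inserted
theorem pv_getD_foldl_insert_fun {κ ν : Type} [BEq κ] [LawfulBEq κ] [DecidableEq κ] (f : κ → ν) (d0 : ν) :
    ∀ (L : List κ) (r0 : PySem.Dict κ ν) (y : κ),
      (L.foldl (fun r x => r.insert x (f x)) r0).getD y d0 = if y ∈ L then f y else r0.getD y d0 := by
  intro L
  induction L with
  | nil => intro r0 y; simp
  | cons x L ih =>
    intro r0 y
    simp only [List.foldl_cons]
    rw [ih]
    by_cases hy : y ∈ L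
    · simp [hy]
    · rw [PySem.Dict.getD_insert]
      by_cases hx : y = x
      · simp [hx]
      · simp [hx, hy]

-- keys of such a fold from empty: the distinct elements of L in order
theorem pv_keys_foldl_insert_fun {ν : Type} (g : String → ν) (L : List String) :
    (L.foldl (fun r o => r.insert o (g o)) (PySem.Dict.empty : PySem.Dict String ν)).keys =
      PySem.Set.ofList L := by
  have h := PySem.Dict.keys_foldl_insert L (fun _ o => g o) (PySem.Dict.empty : PySem.Dict String ν)
  simpa [PySem.Dict.keys_empty, PySem.Set.update_nil_left] using h

-- keys of the row-overlay fold, beta-reduced form of keys_foldl_insert_key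
theorem pv_keys_row_fold (ps : List ((String × String) × Int)) (row : PySem.Dict String Int) :
    (ps.foldl (fun rw p => rw.insert p.1.2 p.2) row).keys =
      PySem.Set.update row.keys (ps.map (fun p => p.1.2)) := by
  simpa using PySem.Dict.keys_foldl_insert_key ps (fun p => p.1.2) (fun _ p => p.2) row

-- the guarded overlay never creates a key
theorem pv_overlay_keys (S : PySem.Set String) :
    ∀ (ps : List ((String × String) × Int)) (r : PySem.Dict String (PySem.Dict String Int)),
      (∀ o, o ∈ S → r.contains o = true) →
      (ps.foldl (fun r p =>
        if S.contains p.1.1 && S.contains p.1.2 then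
          r.modify p.1.1 PySem.Dict.empty (fun inn => inn.insert p.1.2 p.2)
        else r) r).keys = r.keys := by
  intro ps
  induction ps with
  | nil => intro r _; rfl
  | cons p ps ih =>
    intro r hr
    simp only [List.foldl_cons]
    by_cases hg : (S.contains p.1.1 && S.contains p.1.2) = true
    · rw [if_pos hg]
      have hg2 := hg
      rw [Bool.and_eq_true] at hg2
      have hc : r.contains p.1.1 = true :=
        hr _ ((PySem.Set.contains_iff S p.1.1).mp hg2.1)
      have hkeys : (r.modify p.1.1 PySem.Dict.empty fun inn => inn.insert p.1.2 p.2).keys = r.keys := by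
        rw [PySem.Dict.keys_modify, PySem.Dict.keys_insert_of_contains]
        exact hc
      rw [ih _ ?_, hkeys]
      intro o ho
      rw [PySem.Dict.contains_modify]
      simp [hr o ho]
    · rw [if_neg hg]
      exact ih r hr

-- the row of the overlay at key o is the fold of the pairs aimed at o over the starting row
theorem pv_overlay_getD (S : PySem.Set String) :
    ∀ (ps : List ((String × String) × Int)) (r : PySem.Dict String (PySem.Dict String Int)) (o : String),
      (ps.foldl (fun r p =>
        if S.contains p.1.1 && S.contains p.1.2 then
          r.modify p.1.1 PySem.Dict.empty (fun inn => inn.insert p.1.2 p.2)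
        else r) r).getD o PySem.Dict.empty =
      ((ps.filter (fun p => (S.contains p.1.1 && S.contains p.1.2) && (p.1.1 == o))).foldl
        (fun rw p => rw.insert p.1.2 p.2) (r.getD o PySem.Dict.empty)) := by
  intro ps
  induction ps with
  | nil => intro r o; rfl
  | cons p ps ih =>
    intro r o
    simp only [List.foldl_cons, List.filter_cons]
    by_cases hg : (S.contains p.1.1 && S.contains p.1.2) = true
    · rw [if_pos hg]
      by_cases ho : p.1.1 = o
      · have hkeep : ((S.contains p.1.1 && S.contains p.1.2) && (p.1.1 == o)) = true := by
          rw [hg, ho]; simp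
        rw [if_pos hkeep]
        simp only [List.foldl_cons]
        rw [ih]
        congr 1
        rw [PySem.Dict.getD_modify, if_pos ho.symm, ho]
      · have hne : (p.1.1 == o) = false := beq_eq_false_iff_ne.mpr ho
        rw [hne, Bool.and_false]
        simp only [Bool.false_eq_true, if_false]
        rw [ih]
        congr 1
        rw [PySem.Dict.getD_modify, if_neg (fun h => ho h.symm)]
    · have hg' : (S.contains p.1.1 && S.contains p.1.2) = false := by
        simpa using hg
      rw [hg', Bool.false_and]
      simp only [Bool.false_eq_true, if_false]
      exact ih r o

-- inserts that never touch key i leave getD at i alone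
theorem pv_noIns :
    ∀ (qs : List ((String × String) × Int)) (row : PySem.Dict String Int) (i : String),
      (∀ p ∈ qs, p.1.2 ≠ i) →
      (qs.foldl (fun rw p => rw.insert p.1.2 p.2) row).getD i 0 = row.getD i 0 := by
  intro qs
  induction qs with
  | nil => intro row i _; rfl
  | cons p qs ih =>
    intro row i h
    simp only [List.foldl_cons]
    rw [ih _ _ (fun q hq => h q (List.mem_cons_of_mem _ hq)), PySem.Dict.getD_insert,
      if_neg (fun hh => h p (by simp) hh.symm)]

-- value of the overlaid row at (o, i): the unique matching pair of ps, else the start row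
theorem pv_overlayRow (S : PySem.Set String) :
    ∀ (ps : List ((String × String) × Int)) (row : PySem.Dict String Int) (o i : String),
      (ps.map Prod.fst).Nodup → o ∈ S → i ∈ S →
      ((ps.filter (fun p => (S.contains p.1.1 && S.contains p.1.2) && (p.1.1 == o))).foldl
        (fun rw p => rw.insert p.1.2 p.2) row).getD i 0 =
      (match ps.find? (fun p => p.1 == (o, i)) with
       | some p => p.2
       | none => row.getD i 0) := by
  intro ps
  induction ps with
  | nil => intro row o i _ _ _; rfl
  | cons p ps ih =>
    intro row o i hnd ho hi
    rw [List.map_cons, List.nodup_cons] at hnd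
    obtain ⟨hhead, htail⟩ := hnd
    simp only [List.filter_cons, List.find?_cons]
    by_cases hpk : p.1 = (o, i)
    · have hbeq : (p.1 == (o, i)) = true := by simp [hpk]
      rw [hbeq]
      have h1 : p.1.1 = o := by rw [hpk]
      have h2 : p.1.2 = i := by rw [hpk]
      have hkeep : ((S.contains p.1.1 && S.contains p.1.2) && (p.1.1 == o)) = true := by
        rw [h1, h2, (PySem.Set.contains_iff S o).mpr ho, (PySem.Set.contains_iff S i).mpr hi]
        simp
      rw [if_pos hkeep]
      simp only [List.foldl_cons]
      rw [pv_noIns]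
      · rw [PySem.Dict.getD_insert, if_pos h2.symm]
      · intro q hq hqi
        have hq' := List.mem_filter.mp hq
        have hqpred := hq'.2
        rw [Bool.and_eq_true] at hqpred
        have hq1 : q.1.1 = o := eq_of_beq hqpred.2
        have hq1' : q.1 = p.1 := by
          rw [hpk]
          exact Prod.ext_iff.mpr ⟨hq1, hqi⟩
        exact hhead (hq1' ▸ List.mem_map_of_mem hq'.1)
    · have hbeq : (p.1 == (o, i)) = false := beq_eq_false_iff_ne.mpr hpk
      rw [hbeq]
      by_cases hkeep : ((S.contains p.1.1 && S.contains p.1.2) && (p.1.1 == o)) = true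
      · rw [if_pos hkeep]
        simp only [List.foldl_cons]
        rw [ih _ o i htail ho hi]
        have hkeep2 := hkeep
        rw [Bool.and_eq_true] at hkeep2
        have hne : p.1.2 ≠ i := by
          intro h2
          exact hpk (Prod.ext_iff.mpr ⟨eq_of_beq hkeep2.2, h2⟩)
        cases ps.find? (fun p => p.1 == (o, i)) with
        | some q => rfl
        | none =>
          simp only []
          rw [PySem.Dict.getD_insert, if_neg (fun hh => hne hh.symm)]
      · rw [if_neg hkeep]
        exact ih _ o i htail ho hi

-- dict lookup is first-match search in the items list
theorem pv_get?_eq_find? {κ ν : Type} [BEq κ] (d : PySem.Dict κ ν) (x : κ) :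
    d.get? x = (d.items.find? (fun p => p.1 == x)).map Prod.snd := by
  obtain ⟨l⟩ := d
  induction l with
  | nil => rfl
  | cons p l ih =>
    obtain ⟨k, v⟩ := p
    rw [PySem.Dict.get?_mk_cons]
    simp only [List.find?_cons]
    by_cases hk : (k == x) = true
    · simp [hk]
    · simp only [Bool.not_eq_true] at hk
      rw [hk]
      simpa using ih

-- the core equality of the two nested-dict builds
theorem pv_main (d : PySem.Dict (String × String) Int) (L : List String)
    (hndps : (d.items.map Prod.fst).Nodup) :
    (L.foldl (fun r o =>
      r.insert o (L.foldl (fun inn i =>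
        if d.contains (o, i) then inn.insert i (d.getD (o, i) 0) else inn.insert i 0)
        PySem.Dict.empty)) PySem.Dict.empty) =
    (d.items.foldl (fun r p =>
      if (PySem.Set.ofList L).contains p.1.1 && (PySem.Set.ofList L).contains p.1.2 then
        r.modify p.1.1 PySem.Dict.empty (fun inn => inn.insert p.1.2 p.2)
      else r)
      (L.foldl (fun r o =>
        r.insert o (L.foldl (fun inn i => inn.insert i (0 : Int)) PySem.Dict.empty))
        PySem.Dict.empty)) := by
  have hndL : (PySem.Set.ofList L).Nodup := PySem.Set.nodup_ofList L
  have hifA : ∀ o : String,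
      (fun (inn : PySem.Dict String Int) i =>
        if d.contains (o, i) then inn.insert i (d.getD (o, i) 0) else inn.insert i 0) =
      (fun (inn : PySem.Dict String Int) i =>
        inn.insert i (if d.contains (o, i) then d.getD (o, i) 0 else 0)) := by
    intro o; funext inn i; split <;> rfl
  have hbaseKeys :
      (L.foldl (fun r o =>
        r.insert o (L.foldl (fun inn i => inn.insert i (0 : Int)) PySem.Dict.empty))
        PySem.Dict.empty).keys = PySem.Set.ofList L :=
    pv_keys_foldl_insert_fun _ L
  have hAKeys :
      (L.foldl (fun r o =>
        r.insert o (L.foldl (fun inn i =>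
          if d.contains (o, i) then inn.insert i (d.getD (o, i) 0) else inn.insert i 0)
          PySem.Dict.empty)) PySem.Dict.empty).keys = PySem.Set.ofList L :=
    pv_keys_foldl_insert_fun _ L
  have hbaseContains : ∀ o, o ∈ (PySem.Set.ofList L : PySem.Set String) →
      (L.foldl (fun r o =>
        r.insert o (L.foldl (fun inn i => inn.insert i (0 : Int)) PySem.Dict.empty))
        PySem.Dict.empty).contains o = true := by
    intro o ho
    rw [PySem.Dict.contains_iff_mem_keys] at *
    rw [hbaseKeys]
    exact ho
  have hBKeys := pv_overlay_keys (PySem.Set.ofList L) d.items _ hbaseContains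
  apply PySem.Dict.ext
  rw [PySem.Dict.items_eq_map_keys _ (by rw [hAKeys]; exact hndL) PySem.Dict.empty,
    PySem.Dict.items_eq_map_keys _ (by rw [hBKeys, hbaseKeys]; exact hndL) PySem.Dict.empty,
    hAKeys, hBKeys, hbaseKeys]
  refine List.map_congr_left ?_
  intro o ho
  have hoL : o ∈ L := (PySem.Set.mem_ofList _ _).mp ho
  have hrow :
      (L.foldl (fun r o =>
        r.insert o (L.foldl (fun inn i =>
          if d.contains (o, i) then inn.insert i (d.getD (o, i) 0) else inn.insert i 0)
          PySem.Dict.empty)) PySem.Dict.empty).getD o PySem.Dict.empty =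
      (d.items.foldl (fun r p =>
        if (PySem.Set.ofList L).contains p.1.1 && (PySem.Set.ofList L).contains p.1.2 then
          r.modify p.1.1 PySem.Dict.empty (fun inn => inn.insert p.1.2 p.2)
        else r)
        (L.foldl (fun r o =>
          r.insert o (L.foldl (fun inn i => inn.insert i (0 : Int)) PySem.Dict.empty))
          PySem.Dict.empty)).getD o PySem.Dict.empty := by
    rw [pv_getD_foldl_insert_fun
      (fun o => L.foldl (fun inn i =>
        if d.contains (o, i) then inn.insert i (d.getD (o, i) 0) else inn.insert i 0)
        PySem.Dict.empty) PySem.Dict.empty L PySem.Dict.empty o,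
      if_pos hoL]
    rw [pv_overlay_getD (PySem.Set.ofList L) d.items _ o]
    rw [pv_getD_foldl_insert_fun
      (fun _ => L.foldl (fun inn i => inn.insert i (0 : Int)) PySem.Dict.empty)
      PySem.Dict.empty L PySem.Dict.empty o, if_pos hoL]
    -- inner dicts: compare items via keys + getD
    apply PySem.Dict.ext
    have hrowAkeys :
        (L.foldl (fun inn i =>
          if d.contains (o, i) then inn.insert i (d.getD (o, i) 0) else inn.insert i 0)
          PySem.Dict.empty).keys = PySem.Set.ofList L := by
      rw [hifA o]
      exact pv_keys_foldl_insert_fun _ L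
    have hrowZkeys :
        (L.foldl (fun inn i => inn.insert i (0 : Int)) PySem.Dict.empty).keys =
          PySem.Set.ofList L := pv_keys_foldl_insert_fun _ L
    have hrowBkeys :
        ((d.items.filter (fun p =>
          ((PySem.Set.ofList L).contains p.1.1 && (PySem.Set.ofList L).contains p.1.2) &&
            (p.1.1 == o))).foldl (fun rw p => rw.insert p.1.2 p.2)
          (L.foldl (fun inn i => inn.insert i (0 : Int)) PySem.Dict.empty)).keys =
          PySem.Set.ofList L := by
      rw [pv_keys_row_fold, hrowZkeys, PySem.Set.update_eq_append_filter]
      have hnil : (List.filter (fun y => !(PySem.Set.ofList L).contains y)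
          (PySem.Set.ofList ((d.items.filter (fun p =>
            ((PySem.Set.ofList L).contains p.1.1 && (PySem.Set.ofList L).contains p.1.2) &&
              (p.1.1 == o))).map (fun p => p.1.2)))) = [] := by
        rw [List.filter_eq_nil_iff]
        intro y hy
        have hy' : y ∈ (d.items.filter (fun p =>
            ((PySem.Set.ofList L).contains p.1.1 && (PySem.Set.ofList L).contains p.1.2) &&
              (p.1.1 == o))).map (fun p => p.1.2) := (PySem.Set.mem_ofList _ _).mp hy
        obtain ⟨q, hq, hqy⟩ := List.mem_map.mp hy'
        have hq' := (List.mem_filter.mp hq).2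
        rw [Bool.and_eq_true] at hq'
        have hq'' := hq'.1
        rw [Bool.and_eq_true] at hq''
        rw [← hqy, hq''.2]
        simp
      rw [hnil, List.append_nil]
    rw [PySem.Dict.items_eq_map_keys _ (by rw [hrowAkeys]; exact hndL) (0 : Int),
      PySem.Dict.items_eq_map_keys _ (by rw [hrowBkeys]; exact hndL) (0 : Int),
      hrowAkeys, hrowBkeys]
    refine List.map_congr_left ?_
    intro i hi
    have hiL : i ∈ L := (PySem.Set.mem_ofList _ _).mp hi
    have hval :
        (L.foldl (fun inn i =>
          if d.contains (o, i) then inn.insert i (d.getD (o, i) 0) else inn.insert i 0)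
          PySem.Dict.empty).getD i 0 =
        ((d.items.filter (fun p =>
          ((PySem.Set.ofList L).contains p.1.1 && (PySem.Set.ofList L).contains p.1.2) &&
            (p.1.1 == o))).foldl (fun rw p => rw.insert p.1.2 p.2)
          (L.foldl (fun inn i => inn.insert i (0 : Int)) PySem.Dict.empty)).getD i 0 := by
      rw [hifA o]
      rw [pv_getD_foldl_insert_fun
        (fun i => if d.contains (o, i) then d.getD (o, i) 0 else 0) (0 : Int) L
        PySem.Dict.empty i, if_pos hiL]
      rw [pv_overlayRow (PySem.Set.ofList L) d.items _ o i hndps ho hi]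
      cases hf : d.items.find? (fun p => p.1 == (o, i)) with
      | some q =>
        have hget : d.get? (o, i) = some q.2 := by
          rw [pv_get?_eq_find?, hf]; rfl
        have hcont : d.contains (o, i) = true := by
          rw [PySem.Dict.contains_eq_isSome_get?, hget]; rfl
        rw [if_pos hcont, PySem.Dict.getD_eq_get?_getD, hget]
        rfl
      | none =>
        have hget : d.get? (o, i) = none := by
          rw [pv_get?_eq_find?, hf]; rfl
        have hcont : d.contains (o, i) = false := by
          rw [PySem.Dict.contains_eq_isSome_get?, hget]; rfl
        rw [if_neg (by simp [hcont])]
        rw [pv_getD_foldl_insert_fun (fun _ => (0 : Int)) (0 : Int) L PySem.Dict.empty i,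
          if_pos hiL]
    rw [hval]
  rw [hrow]

-- ===== VERDICT (by name: the statement is the Claim_ definition above) =====
theorem refined_trans_dict_spec : Claim_equal_refined_trans_dict := by
  intro tr_d klabels _
  unfold Spec_refined_trans_dict
  exact congrArg
    (fun r : PySem.Dict String (PySem.Dict String Int) =>
      r.items.map (fun p => (p.1, p.2.items)))
    (pv_main (PySem.Dict.ofList (tr_d.map (fun p => ((p.1, p.2.1), p.2.2))))
      (["START"] ++ klabels ++ ["STOP"])
      (by simpa [PySem.Dict.keys] using
        PySem.Dict.nodup_keys_ofList (tr_d.map (fun p => ((p.1, p.2.1), p.2.2)))))
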